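-- pv_equiv track=rewrite | github.com/DataScienceBioLab/reptile | projects/cse_algorithms/problems/HW4/q1_deteriorating_conditions/main.py | solve
-- ===== SOURCE A (Python) =====
-- def solve(n: int, m: int, costs: list[int]) -> int:
--     """
--     Solve the deteriorating conditions problem.
--
--     Args:
--         n: Number of fights
--         m: Number of armor pieces
--         costs: List of base costs for each fight
--
--     Returns:
--         Minimum total cost for all fights
--     """
--     # Sort costs in descending order to minimize impact of multipliers
--     costs.sort(reverse=True)
--
--     # Initialize total cost
--     total_cost = 0
--
--     # For each fight, assign it to the armor piece that will minimize the total cost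
--     for i in range(n):
--         # Calculate which armor piece this fight should use (0-based)
--         armor_index = i % m
--         # Calculate the multiplier (1-based)
--         multiplier = (i // m) + 1
--         # Add the cost with multiplier
--         total_cost += costs[i] * multiplier
--
--     return total_cost
-- ===== SOURCE B (Python) =====
-- def solve(n, m, costs):
--     """Multiplier-free reformulation: the armor multiplier of the i-th most
--     expensive fight equals the number of refresh thresholds t = 0, m, 2m, ...
--     with t <= i, so the answer is the sum over thresholds of the suffix sum
--     of the n dearest costs from that threshold on, read off a prefix-sum table."""
--     costs.sort(reverse=True)
--     prefix = [0]
--     for i in range(n):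
--         prefix.append(prefix[-1] + costs[i])
--     total = 0
--     t = 0
--     while t < n:
--         total += prefix[n] - prefix[t]
--         t += m
--     return total
-- ===== Notes on version B (the rewrite author's own statement) =====
-- stated objective: alternative
-- what changed: B computes no multipliers at all: it builds a prefix-sum table of the sorted costs and sums, over each armor refresh threshold t = 0, m, 2m, ..., the suffix sum prefix[n] - prefix[t], using the identity multiplier(i) = #{thresholds <= i}.
-- outside the precondition, e.g. on solve(2, -1, [3, 5]): A returns 5, B raises IndexError
import Mathlib
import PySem

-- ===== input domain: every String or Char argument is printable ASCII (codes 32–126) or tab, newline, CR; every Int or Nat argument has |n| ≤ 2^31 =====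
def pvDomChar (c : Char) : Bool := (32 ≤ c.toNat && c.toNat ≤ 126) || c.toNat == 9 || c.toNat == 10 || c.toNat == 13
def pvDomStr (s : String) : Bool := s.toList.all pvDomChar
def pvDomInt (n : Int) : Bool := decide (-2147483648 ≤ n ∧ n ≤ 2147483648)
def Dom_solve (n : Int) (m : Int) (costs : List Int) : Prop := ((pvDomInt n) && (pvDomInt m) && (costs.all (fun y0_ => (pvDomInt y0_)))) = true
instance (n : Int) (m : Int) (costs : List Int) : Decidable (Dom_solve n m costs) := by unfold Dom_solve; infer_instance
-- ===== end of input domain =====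

-- B drops A's per-index multipliers i//m + 1 entirely: it builds a prefix-sum table of the sorted
-- costs and sums the suffix sum prefix[n] - prefix[t] over each refresh threshold t = 0, m, 2m, ….
-- Equivalence is about the RETURN value; B performs the same in-place descending sort of `costs` as A.

-- ===== PORT A =====
def solve (n : Int) (m : Int) (costs : List Int) : Int :=
  let cs := PySem.List.sorted costs (fun x => x) true
  (PySem.List.pyRange 0 n 1).foldl
    (fun total i => total + PySem.List.pyGetD cs i 0 * (PySem.Int.floordiv i m + 1)) 0

-- ===== PORT B =====
-- the 'while t < n' loop of Source B, as fuel recursion; fuel n.toNat bounds the iteration count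
-- whenever the Python loop terminates (m >= 1, or no iteration at all when n <= 0)
def solveAltLoop (pfx : List Int) (n m : Int) : Nat → Int → Int → Int
  | 0, _, total => total
  | k + 1, t, total =>
    if t < n then
      solveAltLoop pfx n m k (t + m)
        (total + (PySem.List.pyGetD pfx n 0 - PySem.List.pyGetD pfx t 0))
    else total

def solve_alt (n : Int) (m : Int) (costs : List Int) : Int :=
  let cs := PySem.List.sorted costs (fun x => x) true
  let pfx := (PySem.List.pyRange 0 n 1).foldl
      (fun p i => p ++ [PySem.List.pyGetD p (-1) 0 + PySem.List.pyGetD cs i 0]) [0]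
  solveAltLoop pfx n m n.toNat 0 0

-- ===== PRECONDITION & SPEC =====
-- Pre_ excludes n > len(costs) (A raises IndexError), and m ≤ 0 with 0 < n: there A raises
-- ZeroDivisionError (m = 0) or, for the meaningless negative armor count m < 0, returns an
-- accidental floor-division value outside the problem's natural domain (B raises IndexError there).
def Pre_solve (n : Int) (m : Int) (costs : List Int) : Prop :=
  n ≤ (costs.length : Int) ∧ (1 ≤ m ∨ n ≤ 0)
instance (n : Int) (m : Int) (costs : List Int) : Decidable (Pre_solve n m costs) := by
  unfold Pre_solve; infer_instance
def pvWitness_solve : Int × Int × List Int := (3, 2, [1, 2, 5])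

def Spec_solve (n : Int) (m : Int) (costs : List Int) (out : Int) : Prop := out = solve_alt n m costs
instance (n : Int) (m : Int) (costs : List Int) (out : Int) : Decidable (Spec_solve n m costs out) := by
  unfold Spec_solve; infer_instance

-- ===== CLAIM (what is proved, stated in full; the proofs are below) =====
def Claim_equal_solve : Prop := ∀ (n : Int) (m : Int) (costs : List Int), Dom_solve n m costs → Pre_solve n m costs → Spec_solve n m costs (solve n m costs)

-- ===== LEMMAS AND PROOFS =====

-- prefix sum of f over [0, t)
def psum (f : Int → Int) (t : Int) : Int := ((PySem.List.pyRange 0 t 1).map f).sum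

lemma psum_succ (f : Int → Int) {t : Int} (ht : 0 ≤ t) : psum f (t + 1) = psum f t + f t := by
  unfold psum
  rw [PySem.List.pyRange_one_succ_right ht]
  simp

-- the prefix-building foldl of B yields exactly the table of partial sums [psum 0, …, psum j]
lemma pfx_build (f : Int → Int) :
    ∀ (j : Int), 0 ≤ j →
    (PySem.List.pyRange 0 j 1).foldl
        (fun p i => p ++ [PySem.List.pyGetD p (-1) 0 + f i]) [0]
      = (PySem.List.pyRange 0 (j + 1) 1).map (psum f) := by
  intro j hj
  induction j, hj using Int.le_induction with
  | base =>
    rw [PySem.List.pyRange_one_eq_nil le_rfl, PySem.List.pyRange_one_singleton]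
    simp [psum, PySem.List.pyRange_one_eq_nil]
  | succ j hj ih =>
    rw [PySem.List.pyRange_one_succ_right hj, List.foldl_append, ih,
      PySem.List.pyRange_one_succ_right (by omega : (0:Int) ≤ j + 1)]
    simp only [List.foldl_cons, List.foldl_nil, List.map_append, List.map_cons, List.map_nil]
    congr 1
    have hlast : PySem.List.pyGetD ((PySem.List.pyRange 0 (j + 1) 1).map (psum f)) (-1) 0
        = psum f j := by
      rw [PySem.List.pyRange_one_succ_right hj]
      simp only [List.map_append, List.map_cons, List.map_nil]
      rw [PySem.List.pyGetD_neg_one_append_singleton]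
    rw [hlast, psum_succ f hj]

-- reading the table: pfx[t] = psum t for 0 ≤ t ≤ n
lemma pfx_get (f : Int → Int) {n t : Int} (hn : 0 ≤ n) (ht0 : 0 ≤ t) (htn : t ≤ n) :
    PySem.List.pyGetD ((PySem.List.pyRange 0 (n + 1) 1).map (psum f)) t 0 = psum f t := by
  rw [PySem.List.pyGetD_map_pyRange_of_nonneg (psum f) (n + 1) t 0 ht0 (by omega)]

-- splitting the prefix sum: psum n - psum t = sum of f over [t, n)
lemma psum_sub (f : Int → Int) {t n : Int} (ht : 0 ≤ t) (htn : t ≤ n) :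
    psum f n - psum f t = ((PySem.List.pyRange t n 1).map f).sum := by
  unfold psum
  rw [PySem.List.pyRange_one_append 0 t n ht htn]
  simp

-- on the block [t, min(t+m,n)) all floor quotients by m equal g, so those terms of the
-- residual multiplier (i//m - g) vanish
lemma block_zero (f : Int → Int) {m t g : Int} (hm : 1 ≤ m) (ht : t = g * m) (n : Int) :
    ((PySem.List.pyRange t (min (t + m) n) 1).map
        (fun i => f i * (PySem.Int.floordiv i m - g))).sum = 0 := by
  have hmap : (PySem.List.pyRange t (min (t + m) n) 1).map
        (fun i => f i * (PySem.Int.floordiv i m - g))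
      = (PySem.List.pyRange t (min (t + m) n) 1).map (fun _ => 0) := by
    apply List.map_congr_left
    intro i hi
    rw [PySem.List.mem_pyRange_one] at hi
    have hfd : PySem.Int.floordiv i m = g := by
      rw [PySem.Int.floordiv_eq_iff_of_pos (by omega)]
      constructor
      · omega
      · have h1 : i < t + m := lt_of_lt_of_le hi.2 (min_le_left _ _)
        have : (g + 1) * m = g * m + m := by ring
        omega
    rw [hfd]; ring
  rw [hmap]; simp

-- B's while loop accumulates, threshold by threshold, A's per-index sum over [t, n)
-- with the residual multiplier i//m - g + 1
lemma loop_eq (f : Int → Int) (n m : Int) (hm : 1 ≤ m) (hn : 0 ≤ n) :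
    ∀ (k : Nat) (g t total : Int), 0 ≤ g → t = g * m → (n - t).toNat ≤ k →
    solveAltLoop ((PySem.List.pyRange 0 (n + 1) 1).map (psum f)) n m k t total
      = total + ((PySem.List.pyRange t n 1).map
          (fun i => f i * (PySem.Int.floordiv i m - g + 1))).sum := by
  intro k
  induction k with
  | zero =>
    intro g t total _ _ hk
    rw [solveAltLoop, PySem.List.pyRange_one_eq_nil (by omega)]
    simp
  | succ k ih =>
    intro g t total hg ht hk
    rw [solveAltLoop]
    by_cases hlt : t < n
    · have ht0 : 0 ≤ t := by nlinarith
      rw [if_pos hlt, ih (g + 1) (t + m) _ (by omega) (by rw [ht]; ring) (by omega),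
        pfx_get f hn hn le_rfl, pfx_get f hn ht0 (by omega),
        psum_sub f ht0 (by omega)]
      have hsplit : ((PySem.List.pyRange t n 1).map
            (fun i => f i * (PySem.Int.floordiv i m - g + 1))).sum
          = ((PySem.List.pyRange t n 1).map
              (fun i => f i * (PySem.Int.floordiv i m - (g + 1) + 1))).sum
            + ((PySem.List.pyRange t n 1).map f).sum := by
        rw [← List.sum_map_add]
        apply congrArg
        apply List.map_congr_left
        intro i _
        ring
      have hdrop : ((PySem.List.pyRange t n 1).map
            (fun i => f i * (PySem.Int.floordiv i m - (g + 1) + 1))).sum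
          = ((PySem.List.pyRange (t + m) n 1).map
              (fun i => f i * (PySem.Int.floordiv i m - (g + 1) + 1))).sum := by
        by_cases hfull : t + m ≤ n
        · rw [PySem.List.pyRange_one_append t (t + m) n (by omega) hfull, List.map_append,
            List.sum_append]
          have := block_zero f hm ht n (m := m) (g := g)
          rw [min_eq_left hfull] at this
          have hz : ((PySem.List.pyRange t (t + m) 1).map
              (fun i => f i * (PySem.Int.floordiv i m - (g + 1) + 1))).sum = 0 := by
            calc ((PySem.List.pyRange t (t + m) 1).map
                  (fun i => f i * (PySem.Int.floordiv i m - (g + 1) + 1))).sum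
                = ((PySem.List.pyRange t (t + m) 1).map
                  (fun i => f i * (PySem.Int.floordiv i m - g))).sum := by
                  apply congrArg; apply List.map_congr_left; intro i _; ring
              _ = 0 := this
          rw [hz, zero_add]
        · rw [PySem.List.pyRange_one_eq_nil (show n ≤ t + m by omega)]
          have := block_zero f hm ht n (m := m) (g := g)
          rw [min_eq_right (by omega : n ≤ t + m)] at this
          simp only [List.map_nil, List.sum_nil]
          calc ((PySem.List.pyRange t n 1).map
                (fun i => f i * (PySem.Int.floordiv i m - (g + 1) + 1))).sum
              = ((PySem.List.pyRange t n 1).map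
                (fun i => f i * (PySem.Int.floordiv i m - g))).sum := by
                apply congrArg; apply List.map_congr_left; intro i _; ring
            _ = 0 := this
      rw [hsplit, hdrop]
      ring
    · rw [if_neg hlt, PySem.List.pyRange_one_eq_nil (by omega)]
      simp

-- ===== VERDICT (by name: the statement is the Claim_ definition above) =====
theorem solve_spec : Claim_equal_solve := by
  intro n m costs _ hpre
  unfold Spec_solve
  obtain ⟨hlen, hcase⟩ := hpre
  show solve n m costs = solve_alt n m costs
  unfold solve solve_alt
  simp only [PySem.List.foldl_add, zero_add]
  set cs := PySem.List.sorted costs (fun x => x) true with hcs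
  set f : Int → Int := fun i => PySem.List.pyGetD cs i 0 with hf
  by_cases hn : 0 ≤ n
  · by_cases hm : 1 ≤ m
    · rw [pfx_build f n hn,
        loop_eq f n m hm hn n.toNat 0 0 0 le_rfl (by ring) (by omega)]
      simp only [zero_add]
      apply congrArg
      apply List.map_congr_left
      intro i _
      ring
    · have hn0 : n ≤ 0 := by rcases hcase with h | h <;> omega
      have : n = 0 := le_antisymm hn0 hn
      subst this
      rw [PySem.List.pyRange_one_eq_nil le_rfl]
      simp [solveAltLoop]
  · have hfuel : n.toNat = 0 := by omega
    rw [hfuel, PySem.List.pyRange_one_eq_nil (by omega)]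
    simp [solveAltLoop]
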